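-- pv_equiv track=rewrite | github.com/tetrapus/Karkat | text.py | justifiedtable
-- ===== SOURCE A (Python) =====
-- def justifiedtable(array, width, minsep=3):
--     """
--     Formats a string array into equal-length rows.
--     """
--     result = [[]]
--     table = []
--     for data in array:
--         if sum(len(x) + minsep for x in result[-1]) + len(data) <= width:
--             result[-1].append(data)
--         else:
--             result.append([data])
--     for row in result:
--         if len(row) > 1:
--             table.append(row[0])
--             sepwidth, spares = divmod(width - sum(len(x) for x in row), len(row) - 1)
--             for i, string in enumerate(row[1:]):
--                 table[-1] += " "*sepwidth
--                 if i < spares: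
--                     table[-1] += " "
--                 table[-1] += string
--         elif row:
--             table.append(row[0])
--     return table
-- ===== SOURCE B (Python) =====
-- def _justify(row, width, sumlen):
--     # Justify one non-empty row whose tokens have total length sumlen.
--     k = len(row)
--     if k == 1:
--         return row[0]
--     sep, spares = divmod(width - sumlen, k - 1)
--     gaps = [" " * sep + " "] * spares + [" " * sep] * (k - 1 - spares)
--     return "".join(t + g for t, g in zip(row, gaps)) + row[-1]
--
--
-- def justifiedtable(array, width, minsep=3):
--     """
--     Formats a string array into equal-length rows.
--     """
--     # prefix sums of len(token) + minsep, so row widths and sums are O(1) lookups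
--     pref = [0]
--     for x in array:
--         pref.append(pref[-1] + len(x) + minsep)
--     table = []
--     i, n = 0, len(array)
--     while i < n:
--         j = i + 1
--         while j < n and pref[j + 1] - pref[i] - minsep <= width:
--             j += 1
--         table.append(_justify(array[i:j], width, pref[j] - pref[i] - (j - i) * minsep))
--         i = j
--     return table
-- ===== Notes on version B (the rewrite author's own statement) =====
-- stated objective: alternative
-- what changed: B precomputes a prefix-sum array of len(token)+minsep and finds each row boundary by index arithmetic on it (pref[j+1]-pref[i]-minsep <= width), then justifies each slice array[i:j] by zipping it with a precomputed gap list, instead of A's two passes that build explicit row lists token by token (re-summing the current row's width for every token) and then justify by in-place string accumulation.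
import Mathlib
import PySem

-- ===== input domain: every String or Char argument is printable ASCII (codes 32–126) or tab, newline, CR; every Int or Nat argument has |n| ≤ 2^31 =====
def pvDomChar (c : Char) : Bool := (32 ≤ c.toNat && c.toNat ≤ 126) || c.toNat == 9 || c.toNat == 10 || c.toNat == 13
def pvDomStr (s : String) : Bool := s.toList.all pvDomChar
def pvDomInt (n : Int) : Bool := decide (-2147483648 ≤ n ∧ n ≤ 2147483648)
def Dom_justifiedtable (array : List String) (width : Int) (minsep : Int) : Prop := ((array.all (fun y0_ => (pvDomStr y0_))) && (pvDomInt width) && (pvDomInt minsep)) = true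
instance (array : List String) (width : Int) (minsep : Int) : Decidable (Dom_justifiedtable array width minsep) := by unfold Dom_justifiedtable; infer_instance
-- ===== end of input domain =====

-- B replaces A's two passes (build explicit row lists token by token, re-summing the current
-- row's width for each token, then justify each row by in-place accumulation) with a prefix-sum
-- array over which row boundaries are found by index arithmetic, slicing out each row and
-- justifying it by zipping it with a precomputed gap list; objective: alternative decomposition.

-- ===== PORT A =====

-- " " * n  (empty for n ≤ 0, as in Python)
def pvSpaces (n : Int) : String := String.ofList (List.replicate n.toNat ' ')

-- sum(len(x) for x in row)
def pvSumLen (row : List String) : Int := (row.map (fun x => (PySem.Str.len x : Int))).sum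

-- sum(len(x) + minsep for x in row)
def pvRowW (minsep : Int) (row : List String) : Int :=
  (row.map (fun x => (PySem.Str.len x : Int) + minsep)).sum

-- one step of A's first loop; `result` holds the rows most-recent-first (Python appends at the end)
def pvPackStep (width minsep : Int) (result : List (List String)) (data : String) : List (List String) :=
  match result with
  | last :: rest =>
      if pvRowW minsep last + (PySem.Str.len data : Int) ≤ width then (last ++ [data]) :: rest
      else [data] :: last :: rest
  | [] => [[data]]  -- unreachable: result starts as [[]] and never becomes empty

-- A's inner justification loop for a row (only called with len(row) > 1)
def pvJustA (width : Int) (row : List String) : String :=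
  match row with
  | [] => ""  -- unreachable
  | h :: t =>
    let sepwidth := PySem.Int.floordiv (width - pvSumLen row) ((row.length : Int) - 1)
    let spares := PySem.Int.mod (width - pvSumLen row) ((row.length : Int) - 1)
    (PySem.List.enumerate t 0).foldl
      (fun s p => s ++ pvSpaces sepwidth ++ (if p.1 < spares then " " else "") ++ p.2) h

-- what A's second loop appends to `table` for one row
def pvEmitA (width : Int) (row : List String) : List String :=
  if 1 < row.length then [pvJustA width row]
  else match row with
    | [] => []
    | r0 :: _ => [r0]

def justifiedtable (array : List String) (width : Int) (minsep : Int) : List String :=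
  let result := array.foldl (pvPackStep width minsep) [[]]
  result.reverse.foldl (fun table row => table ++ pvEmitA width row) []

-- ===== PORT B =====

-- Source B's _justify(row, width, sumlen): gap list [" "*sep+" "]*spares ++ [" "*sep]*(k-1-spares),
-- then "".join(t+g for t,g in zip(row, gaps)) + row[-1]; single-token rows verbatim
def pvJustB (width sumlen : Int) (row : List String) : String :=
  match row with
  | [] => ""   -- unreachable: only called on non-empty slices
  | [x] => x
  | _ :: _ :: _ =>
    let sep := PySem.Int.floordiv (width - sumlen) ((row.length : Int) - 1)
    let spares := PySem.Int.mod (width - sumlen) ((row.length : Int) - 1)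
    -- spares = (…) % (k-1) with k-1 ≥ 1 is in [0, k-2], so the Nat subtraction is exact
    let gaps := List.replicate spares.toNat (pvSpaces sep ++ " ") ++
                List.replicate ((row.length - 1) - spares.toNat) (pvSpaces sep)
    PySem.Str.join "" ((row.zip gaps).map (fun p => p.1 ++ p.2)) ++ row.getLast!

-- pref = [0]; for x in array: pref.append(pref[-1] + len(x) + minsep)
def pvPref (minsep : Int) (array : List String) : List Int :=
  array.foldl (fun p x => p ++ [p.getLast! + (PySem.Str.len x : Int) + minsep]) [0]

-- inner while: j advances while j < n and pref[j+1] - pref[i] - minsep <= width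
-- (pref indices are always in range, so pref[·] is ported as getD · 0)
def pvScanB (pref : List Int) (width minsep pi : Int) (n j : Nat) : Nat :=
  if h : j < n ∧ pref.getD (j+1) 0 - pi - minsep ≤ width then pvScanB pref width minsep pi n (j+1)
  else j
termination_by n - j
decreasing_by omega

-- the scan never moves backwards (needed for termination of the outer while)
theorem le_pvScanB (pref : List Int) (width minsep pi : Int) (n : Nat) :
    ∀ j, j ≤ pvScanB pref width minsep pi n j := by
  have key : ∀ k j, n - j ≤ k → j ≤ pvScanB pref width minsep pi n j := by
    intro k
    induction k with
    | zero =>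
      intro j hj
      rw [pvScanB]
      split
      · omega
      · exact Nat.le_refl j
    | succ k ih =>
      intro j hj
      rw [pvScanB]
      split
      · exact Nat.le_trans (Nat.le_succ j) (ih (j+1) (by omega))
      · exact Nat.le_refl j
  intro j; exact key (n - j) j (Nat.le_refl _)

-- outer while over the start index i; table is the accumulator
def pvRowsB (array : List String) (pref : List Int) (width minsep : Int) (n : Nat)
    (table : List String) (i : Nat) : List String :=
  if _hi : i < n then
    let j := pvScanB pref width minsep (pref.getD i 0) n (i+1)
    let sumlen := pref.getD j 0 - pref.getD i 0 - ((j : Int) - (i : Int)) * minsep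
    pvRowsB array pref width minsep n
      (table ++ [pvJustB width sumlen (PySem.List.slice array (some (i : Int)) (some (j : Int)))]) j
  else table
termination_by n - i
decreasing_by
  show n - pvScanB pref width minsep (pref.getD i 0) n (i+1) < n - i
  have := le_pvScanB pref width minsep (pref.getD i 0) n (i+1)
  omega

def justifiedtable_alt (array : List String) (width : Int) (minsep : Int) : List String :=
  pvRowsB array (pvPref minsep array) width minsep array.length [] 0

-- ===== PRECONDITION & SPEC =====
def Spec_justifiedtable (array : List String) (width : Int) (minsep : Int) (out : List String) : Prop := out = justifiedtable_alt array width minsep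
instance (array : List String) (width : Int) (minsep : Int) (out : List String) : Decidable (Spec_justifiedtable array width minsep out) := by unfold Spec_justifiedtable; infer_instance

-- ===== CLAIM (what is proved, stated in full; the proofs are below) =====
def Claim_equal_justifiedtable : Prop := ∀ (array : List String) (width : Int) (minsep : Int), Dom_justifiedtable array width minsep → Spec_justifiedtable array width minsep (justifiedtable array width minsep)

-- ===== LEMMAS AND PROOFS =====

-- greedy continuation of A's packing as a recursive function: current row cur, remaining tokens
def pvPack (width minsep : Int) : List String → List String → List (List String)
  | cur, [] => [cur]
  | cur, y :: ys =>
    if pvRowW minsep cur + (PySem.Str.len y : Int) ≤ width then pvPack width minsep (cur ++ [y]) ys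
    else cur :: pvPack width minsep [y] ys

-- the tokens a row with running width w grabs from the remaining list, and the leftover
def pvGrab (width minsep : Int) : Int → List String → List String × List String
  | _, [] => ([], [])
  | w, y :: ys =>
    if w + (PySem.Str.len y : Int) ≤ width then
      let r := pvGrab width minsep (w + (PySem.Str.len y : Int) + minsep) ys
      (y :: r.1, r.2)
    else ([], y :: ys)

-- packing where each row forcibly takes its first token (the shape of all rows after the first)
def pvPackF (width minsep : Int) : List String → List (List String)
  | [] => []
  | y :: ys => pvPack width minsep [y] ys

theorem pv_roww_append (m : Int) (c d : List String) :
    pvRowW m (c ++ d) = pvRowW m c + pvRowW m d := by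
  simp [pvRowW]

theorem pv_roww_single (m : Int) (x : String) :
    pvRowW m [x] = (PySem.Str.len x : Int) + m := by simp [pvRowW]

theorem pv_roww_sumlen (m : Int) (l : List String) :
    pvRowW m l = pvSumLen l + (l.length : Int) * m := by
  induction l with
  | nil => simp [pvRowW, pvSumLen]
  | cons x xs ih =>
    have hstep : pvRowW m (x :: xs) = ((PySem.Str.len x : Int) + m) + pvRowW m xs := by
      simp [pvRowW]
    rw [hstep, ih]
    simp only [pvSumLen, List.map_cons, List.sum_cons, List.length_cons]
    push_cast
    ring

-- A's fold is pvPack run from the given current row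
theorem pv_foldl_pack (width minsep : Int) :
    ∀ (xs : List String) (cur : List String) (rest : List (List String)),
      xs.foldl (pvPackStep width minsep) (cur :: rest)
        = (pvPack width minsep cur xs).reverse ++ rest := by
  intro xs
  induction xs with
  | nil => intro cur rest; simp [pvPack]
  | cons y ys ih =>
    intro cur rest
    simp only [List.foldl_cons, pvPackStep, pvPack]
    split
    · exact ih (cur ++ [y]) rest
    · rw [ih [y] (cur :: rest)]; simp

-- pvPack = (current row completed by pvGrab) :: forced packing of the leftover
theorem pv_pack_grab (width minsep : Int) :
    ∀ (xs : List String) (cur : List String),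
      pvPack width minsep cur xs
        = (cur ++ (pvGrab width minsep (pvRowW minsep cur) xs).1)
            :: pvPackF width minsep ((pvGrab width minsep (pvRowW minsep cur) xs).2) := by
  intro xs
  induction xs with
  | nil => intro cur; simp [pvPack, pvGrab, pvPackF]
  | cons y ys ih =>
    intro cur
    simp only [pvPack, pvGrab]
    split
    · rw [ih (cur ++ [y])]
      have harg : pvRowW minsep (cur ++ [y])
          = pvRowW minsep cur + (PySem.Str.len y : Int) + minsep := by
        rw [pv_roww_append, pv_roww_single]; ring
      rw [harg]
      simp
    · simp [pvPackF]

theorem pv_pack_ne (width minsep : Int) :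
    ∀ (xs : List String) (cur : List String), cur ≠ [] →
      ∀ r ∈ pvPack width minsep cur xs, r ≠ [] := by
  intro xs
  induction xs with
  | nil => intro cur hc r hr; simp [pvPack] at hr; simpa [hr]
  | cons y ys ih =>
    intro cur hc r hr
    simp only [pvPack] at hr
    split at hr
    · exact ih (cur ++ [y]) (by simp) r hr
    · rcases List.mem_cons.1 hr with h | h
      · simpa [h]
      · exact ih [y] (by simp) r h

-- glue lemmas for Str.join over "" (concatenation of the pieces)
theorem pv_interc_nil (xs : List (List Char)) : ([] : List Char).intercalate xs = xs.flatten := by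
  simp only [List.intercalate]
  induction xs with
  | nil => simp
  | cons a l ih => cases l <;> simp_all [List.intersperse]

theorem pv_join_empty_nil : PySem.Str.join "" ([] : List String) = "" := by
  simp [PySem.Str.join, PySem.Chars.join, pv_interc_nil]

theorem pv_join_empty_cons (x : String) (xs : List String) :
    PySem.Str.join "" (x :: xs) = x ++ PySem.Str.join "" xs := by
  simp [PySem.Str.join, PySem.Chars.join, pv_interc_nil]

-- A's gap-appending fold written as a join over decorated tokens
theorem pv_fold_join (u : String) (v : Int → String) :
    ∀ (t : List String) (h : String) (k : Int),
      (PySem.List.enumerate t k).foldl (fun s p => s ++ u ++ v p.1 ++ p.2) h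
        = PySem.Str.join "" ((PySem.List.enumerate ((h :: t).dropLast) k).map
            (fun p => p.2 ++ u ++ v p.1)) ++ (h :: t).getLast! := by
  intro t
  induction t with
  | nil =>
    intro h k
    simp [PySem.List.enumerate_nil, pv_join_empty_nil, List.getLast!]
  | cons a t' ih =>
    intro h k
    rw [PySem.List.enumerate_cons, List.foldl_cons, ih]
    cases t' with
    | nil =>
      simp [PySem.List.enumerate_nil, PySem.List.enumerate_cons, pv_join_empty_nil,
        pv_join_empty_cons, List.getLast!, String.append_assoc]
    | cons b t'' =>
      simp only [List.dropLast_cons₂, PySem.List.enumerate_cons, List.map_cons,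
        pv_join_empty_cons, String.append_assoc]
      simp

-- B's zip-with-gaps list is A's enumerate-with-threshold list
theorem pv_zip_gaps (row : List String) (x y : String) (a : Nat) (ha : a ≤ row.length - 1) :
    (row.zip (List.replicate a x ++ List.replicate ((row.length - 1) - a) y)).map
        (fun p => p.1 ++ p.2)
      = (PySem.List.enumerate row.dropLast 0).map
          (fun p => p.2 ++ (if p.1 < (a : Int) then x else y)) := by
  apply List.ext_getElem
  · simp [PySem.List.length_enumerate]; omega
  · intro i h1 h2
    have hi : i < row.length - 1 := by
      simpa [PySem.List.length_enumerate] using h2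
    have hrl : i < row.length := by omega
    simp only [List.getElem_map, List.getElem_zip, PySem.List.getElem_enumerate]
    have hgap : (List.replicate a x ++ List.replicate ((row.length - 1) - a) y)[i]'(by simp; omega)
        = if i < a then x else y := by
      by_cases hia : i < a
      · rw [List.getElem_append_left (by simpa)]
        simp [hia]
      · rw [List.getElem_append_right (by simpa using hia)]
        simp [hia]
    rw [hgap, List.getElem_dropLast]
    simp

-- on a non-empty row, A's justification equals B's (with the true token-length sum)
theorem pv_just_eq (w : Int) (row : List String) (hrow : row ≠ []) :
    pvJustA w row = pvJustB w (pvSumLen row) row := by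
  match row with
  | [x] => simp [pvJustA, pvJustB, PySem.List.enumerate_nil]
  | h :: a :: t =>
    simp only [pvJustA, pvJustB]
    rw [pv_fold_join
      (pvSpaces (PySem.Int.floordiv (w - pvSumLen (h :: a :: t)) (((h :: a :: t).length : Int) - 1)))
      (fun i => if i < PySem.Int.mod (w - pvSumLen (h :: a :: t)) (((h :: a :: t).length : Int) - 1)
        then " " else "")
      (a :: t) h 0]
    have hd : (((h :: a :: t).length : Int) - 1) ≠ 0 := by simp; omega
    have hpos : (0:Int) < (((h :: a :: t).length : Int) - 1) := by simp
    have hmodlb : 0 ≤ PySem.Int.mod (w - pvSumLen (h :: a :: t)) (((h :: a :: t).length : Int) - 1) :=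
      PySem.Int.mod_nonneg _ hpos
    have hmodub : PySem.Int.mod (w - pvSumLen (h :: a :: t)) (((h :: a :: t).length : Int) - 1)
        < (((h :: a :: t).length : Int) - 1) := PySem.Int.mod_lt _ hpos
    rw [pv_zip_gaps (h :: a :: t) _ _
      (PySem.Int.mod (w - pvSumLen (h :: a :: t)) (((h :: a :: t).length : Int) - 1)).toNat
      (by simp at hmodub ⊢; omega)]
    have hcast : ((PySem.Int.mod (w - pvSumLen (h :: a :: t)) (((h :: a :: t).length : Int) - 1)).toNat : Int)
        = PySem.Int.mod (w - pvSumLen (h :: a :: t)) (((h :: a :: t).length : Int) - 1) :=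
      Int.toNat_of_nonneg hmodlb
    rw [hcast]
    congr 2
    apply List.map_congr_left
    intro p hp
    split_ifs <;> simp [String.append_assoc]

-- emission lemmas: for a non-empty row A appends exactly [pvJustA row]
theorem pv_emitA_eq (w : Int) (row : List String) (h : row ≠ []) :
    pvEmitA w row = [pvJustA w row] := by
  match row with
  | [x] => simp [pvEmitA, pvJustA, PySem.List.enumerate_nil]
  | x :: y :: t => simp [pvEmitA]

theorem pv_flatMap_emit (w : Int) :
    ∀ (l : List (List String)), (∀ r ∈ l, r ≠ []) →
      l.flatMap (pvEmitA w) = l.map (pvJustA w) := by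
  intro l
  induction l with
  | nil => simp
  | cons r rs ih =>
    intro h
    rw [List.flatMap_cons, List.map_cons, pv_emitA_eq w r (h r (by simp)),
      ih (fun r' hr' => h r' (by simp [hr']))]
    rfl

-- prefix-sum characterisation: pvPref is the running row widths of all prefixes
theorem pv_pref_spec (m : Int) (array : List String) :
    pvPref m array = (List.range (array.length + 1)).map (fun k => pvRowW m (array.take k)) := by
  induction array using List.reverseRecOn with
  | nil => simp [pvPref, pvRowW]
  | append_singleton as a ih =>
    have hstep : pvPref m (as ++ [a])
        = pvPref m as ++ [(pvPref m as).getLast! + (PySem.Str.len a : Int) + m] := by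
      simp [pvPref, List.foldl_append]
    have hlast : (pvPref m as).getLast! = pvRowW m as := by
      rw [ih, List.range_succ, List.map_append]
      simp [List.take_length]
    rw [hstep, hlast, ih]
    conv_rhs => rw [show (as ++ [a]).length + 1 = (as.length + 1) + 1 by simp,
      List.range_succ, List.map_append]
    congr 1
    · apply List.map_congr_left
      intro k hk
      rw [List.take_append_of_le_length (Nat.lt_succ_iff.mp (List.mem_range.mp hk))]
    · rw [List.map_singleton,
        show as.length + 1 = (as ++ [a]).length by simp, List.take_length,
        pv_roww_append, pv_roww_single]
      rw [add_assoc]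

theorem pv_pref_getD (m : Int) (array : List String) (k : Nat) (hk : k ≤ array.length) :
    (pvPref m array).getD k 0 = pvRowW m (array.take k) := by
  rw [pv_pref_spec]
  rw [List.getD_eq_getElem?_getD]
  rw [List.getElem?_map]
  simp [Nat.lt_succ_iff.mpr hk]

-- the prefix-sum step: S (j+1) = S j + len array[j] + m
theorem pv_S_succ (m : Int) (array : List String) (j : Nat) (hj : j < array.length) :
    pvRowW m (array.take (j+1))
      = pvRowW m (array.take j) + (PySem.Str.len (array[j]'hj) : Int) + m := by
  have h : array.take (j+1) = array.take j ++ [array[j]'hj] := by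
    rw [List.take_add_one, List.getElem?_eq_getElem hj]
    rfl
  rw [h, pv_roww_append, pv_roww_single]
  ring

-- scan step equations
theorem pvScanB_stop (pref : List Int) (width m pi : Int) (n j : Nat)
    (h : ¬ (j < n ∧ pref.getD (j+1) 0 - pi - m ≤ width)) :
    pvScanB pref width m pi n j = j := by
  rw [pvScanB, dif_neg h]

theorem pvScanB_step (pref : List Int) (width m pi : Int) (n j : Nat)
    (h : j < n ∧ pref.getD (j+1) 0 - pi - m ≤ width) :
    pvScanB pref width m pi n j = pvScanB pref width m pi n (j+1) := by
  conv_lhs => rw [pvScanB]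
  rw [dif_pos h]

-- the scan finds exactly the row pvGrab builds
theorem pv_scan_grab (width m : Int) (array : List String) (base : Int) :
    ∀ (j : Nat), j ≤ array.length →
      pvScanB (pvPref m array) width m base array.length j ≤ array.length ∧
      j ≤ pvScanB (pvPref m array) width m base array.length j ∧
      pvGrab width m (pvRowW m (array.take j) - base) (array.drop j)
        = ((array.drop j).take (pvScanB (pvPref m array) width m base array.length j - j),
           array.drop (pvScanB (pvPref m array) width m base array.length j)) := by
  intro j
  have key : ∀ k j, array.length - j ≤ k → j ≤ array.length →
      pvScanB (pvPref m array) width m base array.length j ≤ array.length ∧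
      j ≤ pvScanB (pvPref m array) width m base array.length j ∧
      pvGrab width m (pvRowW m (array.take j) - base) (array.drop j)
        = ((array.drop j).take (pvScanB (pvPref m array) width m base array.length j - j),
           array.drop (pvScanB (pvPref m array) width m base array.length j)) := by
    intro k
    induction k with
    | zero =>
      intro j hk hj
      have hjn : j = array.length := by omega
      rw [pvScanB_stop _ _ _ _ _ _ (by intro hc; omega)]
      subst hjn
      simp [pvGrab]
    | succ k ih =>
      intro j hk hj
      by_cases hjn : j < array.length
      · have hdrop : array.drop j = (array[j]'hjn) :: array.drop (j+1) :=
          List.drop_eq_getElem_cons hjn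
        have hcondiff : ((pvPref m array).getD (j+1) 0 - base - m ≤ width)
            ↔ (pvRowW m (array.take j) - base + (PySem.Str.len (array[j]'hjn) : Int) ≤ width) := by
          rw [pv_pref_getD m array (j+1) (by omega), pv_S_succ m array j hjn]
          constructor <;> intro <;> omega
        by_cases hcond : (pvPref m array).getD (j+1) 0 - base - m ≤ width
        · rw [pvScanB_step _ _ _ _ _ _ ⟨hjn, hcond⟩]
          obtain ⟨h1, h2, h3⟩ := ih (j+1) (by omega) (by omega)
          refine ⟨h1, by omega, ?_⟩
          have harg : pvRowW m (array.take j) - base + (PySem.Str.len (array[j]'hjn) : Int) + m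
              = pvRowW m (array.take (j+1)) - base := by
            rw [pv_S_succ m array j hjn]; ring
          have hunf : pvGrab width m (pvRowW m (array.take j) - base) (array.drop j)
              = ((array[j]'hjn) ::
                  (pvGrab width m (pvRowW m (array.take (j+1)) - base) (array.drop (j+1))).1,
                 (pvGrab width m (pvRowW m (array.take (j+1)) - base) (array.drop (j+1))).2) := by
            rw [hdrop]
            simp only [pvGrab]
            rw [if_pos (hcondiff.mp hcond), harg]
          rw [hunf, h3, hdrop]
          have hstep : pvScanB (pvPref m array) width m base array.length (j+1) - j
              = (pvScanB (pvPref m array) width m base array.length (j+1) - (j+1)) + 1 := by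
            omega
          rw [hstep, List.take_succ_cons]
        · rw [pvScanB_stop _ _ _ _ _ _ (by intro hc; exact hcond hc.2)]
          refine ⟨hj, Nat.le_refl _, ?_⟩
          rw [hdrop]
          simp only [pvGrab]
          rw [if_neg (fun hx => hcond (hcondiff.mpr hx))]
          simp
      · rw [pvScanB_stop _ _ _ _ _ _ (by intro hc; exact hjn hc.1)]
        have hjn' : j = array.length := by omega
        subst hjn'
        simp [pvGrab]
  exact fun hj => key (array.length - j) j (Nat.le_refl _) hj

-- the outer while produces exactly the justified forced packing of the suffix
theorem pv_rows_eq (width m : Int) (array : List String) :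
    ∀ (i : Nat) (table : List String), i ≤ array.length →
      pvRowsB array (pvPref m array) width m array.length table i
        = table ++ (pvPackF width m (array.drop i)).map (pvJustA width) := by
  have key : ∀ k i table, array.length - i ≤ k → i ≤ array.length →
      pvRowsB array (pvPref m array) width m array.length table i
        = table ++ (pvPackF width m (array.drop i)).map (pvJustA width) := by
    intro k
    induction k with
    | zero =>
      intro i table hk hi
      have : i = array.length := by omega
      subst this
      rw [pvRowsB, dif_neg (by omega)]
      simp [pvPackF]
    | succ k ih =>
      intro i table hk hi
      by_cases hin : i < array.length
      · rw [pvRowsB]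
        simp only [dif_pos hin]
        have hbase : (pvPref m array).getD i 0 = pvRowW m (array.take i) :=
          pv_pref_getD m array i (by omega)
        rw [hbase]
        obtain ⟨h1, h2, h3⟩ :=
          pv_scan_grab width m array (pvRowW m (array.take i)) (i+1) (by omega)
        set j := pvScanB (pvPref m array) width m (pvRowW m (array.take i)) array.length (i+1)
          with hjdef
        have hdropi : array.drop i = (array[i]'hin) :: array.drop (i+1) :=
          List.drop_eq_getElem_cons hin
        have hargs : pvRowW m (array.take (i+1)) - pvRowW m (array.take i)
            = pvRowW m [array[i]'hin] := by
          rw [pv_S_succ m array i hin, pv_roww_single]; ring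
        have hpackF : pvPackF width m (array.drop i)
            = ((array[i]'hin) :: ((array.drop (i+1)).take (j - (i+1))))
                :: pvPackF width m (array.drop j) := by
          rw [hdropi]
          show pvPack width m [array[i]'hin] (array.drop (i+1)) = _
          rw [pv_pack_grab, ← hargs, h3]
          simp
        have hslice : PySem.List.slice array (some (i : Int)) (some (j : Int))
            = (array[i]'hin) :: ((array.drop (i+1)).take (j - (i+1))) := by
          rw [PySem.List.slice_natCast, hdropi,
            show j - i = (j - (i+1)) + 1 by omega, List.take_succ_cons]
        have hrowlen : ((array[i]'hin) :: ((array.drop (i+1)).take (j - (i+1)))).length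
            = j - i := by
          simp [List.length_take, List.length_drop]
          omega
        have hsum : (pvPref m array).getD j 0 - pvRowW m (array.take i)
              - ((j : Int) - (i : Int)) * m
            = pvSumLen ((array[i]'hin) :: ((array.drop (i+1)).take (j - (i+1)))) := by
          rw [pv_pref_getD m array j h1]
          have htake : array.take j = array.take i ++ ((array.drop i).take (j - i)) := by
            rw [← List.take_add]
            congr 1
            omega
          have hrow2 : (array.drop i).take (j - i)
              = (array[i]'hin) :: ((array.drop (i+1)).take (j - (i+1))) := by
            rw [hdropi, show j - i = (j - (i+1)) + 1 by omega, List.take_succ_cons]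
          rw [htake, pv_roww_append, hrow2,
            pv_roww_sumlen m ((array[i]'hin) :: ((array.drop (i+1)).take (j - (i+1)))), hrowlen,
            show ((j - i : Nat) : Int) = (j : Int) - (i : Int) by omega]
          ring
        have hne : ((array[i]'hin) :: ((array.drop (i+1)).take (j - (i+1)))) ≠ [] := by simp
        rw [hslice, hsum, ← pv_just_eq width _ hne]
        rw [ih j (table ++ [pvJustA width
          ((array[i]'hin) :: ((array.drop (i+1)).take (j - (i+1))))]) (by omega) h1]
        rw [hpackF, List.map_cons]
        simp
      · have : i = array.length := by omega
        subst this
        rw [pvRowsB, dif_neg (by omega)]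
        simp [pvPackF]
  exact fun i table hi => key (array.length - i) i table (Nat.le_refl _) hi

-- ===== VERDICT (by name: the statement is the Claim_ definition above) =====
theorem justifiedtable_spec : Claim_equal_justifiedtable := by
  intro array width minsep _
  unfold Spec_justifiedtable justifiedtable justifiedtable_alt
  rw [PySem.List.foldl_append_eq_flatMap]
  rw [pv_foldl_pack width minsep array [] []]
  rw [List.append_nil, List.reverse_reverse, List.nil_append]
  rw [pv_rows_eq width minsep array 0 [] (by omega)]
  rw [List.drop_zero, List.nil_append]
  -- pvPack [] array flattens to the same rows as pvPackF array
  cases array with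
  | nil => simp [pvPack, pvPackF, pvEmitA]
  | cons x xs =>
    have hforced : (pvPack width minsep [] (x :: xs)).flatMap (pvEmitA width)
        = (pvPack width minsep [x] xs).flatMap (pvEmitA width) := by
      simp only [pvPack]
      split
      · rfl
      · simp [pvEmitA]
    rw [hforced]
    rw [pv_flatMap_emit width _ (pv_pack_ne width minsep xs [x] (by simp))]
    rfl
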